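-- pv_equiv track=rewrite | github.com/jjoshua2/arc_agi | dupes/e509e548_group-043/test_correct/1440.py | transform
-- ===== SOURCE A (Python) =====
-- from collections import deque
--
-- def transform(grid_lst):
--     if not grid_lst or not grid_lst[0]:
--         return []
--     rows = len(grid_lst)
--     cols = len(grid_lst[0])
--     output = [row[:] for row in grid_lst]
--
--     def get_components():
--         visited = [[False] * cols for _ in range(rows)]
--         components = []
--         for i in range(rows):
--             for j in range(cols):
--                 if grid_lst[i][j] == 3 and not visited[i][j]:
--                     component = []
--                     q = deque([(i, j)])
--                     visited[i][j] = True
--                     while q: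
--                         r, c = q.popleft()
--                         component.append((r, c))
--                         for dr, dc in [(-1, 0), (1, 0), (0, -1), (0, 1)]:
--                             nr, nc = r + dr, c + dc
--                             if 0 <= nr < rows and 0 <= nc < cols and grid_lst[nr][nc] == 3 and not visited[nr][nc]:
--                                 visited[nr][nc] = True
--                                 q.append((nr, nc))
--                     components.append(component)
--         return components
--
--     def get_adj(component):
--         adj = {cell: [] for cell in component}
--         deltas = [(-1, 0), (1, 0), (0, -1), (0, 1)]
--         for r, c in component:
--             for dr, dc in deltas:
--                 nr, nc = r + dr, c + dc
--                 if 0 <= nr < rows and 0 <= nc < cols and grid_lst[nr][nc] == 3 and (nr, nc) in adj: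
--                     adj[(r, c)].append((nr, nc))
--         return adj
--
--     components = get_components()
--     for comp in components:
--         n = len(comp)
--         if n == 0:
--             continue
--         if n == 1:
--             r, c = comp[0]
--             output[r][c] = 1
--             continue
--
--         adj = get_adj(comp)
--         degrees = {cell: len(adj[cell]) for cell in comp}
--         num_ends = sum(1 for d in degrees.values() if d == 1)
--         has_branch = any(d > 2 for d in degrees.values())
--
--         if num_ends != 2 or has_branch:
--             color = 2
--         else:
--             # Traverse path to count bends
--             start = next(cell for cell in comp if degrees[cell] == 1)
--             current = start
--             prev = None
--             directions = []
--             while True: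
--                 next_candidates = [nb for nb in adj[current] if nb != prev]
--                 if not next_candidates:
--                     break
--                 next_cell = next_candidates[0]  # unique for path
--                 dr = next_cell[0] - current[0]
--                 dc = next_cell[1] - current[1]
--                 if dr == -1:
--                     dir_ = 'U'
--                 elif dr == 1:
--                     dir_ = 'D'
--                 elif dc == -1:
--                     dir_ = 'L'
--                 else:  # dc == 1
--                     dir_ = 'R'
--                 directions.append(dir_)
--                 prev = current
--                 current = next_cell
--
--             bends = sum(1 for i in range(1, len(directions)) if directions[i] != directions[i - 1])
--             color = 1 if bends <= 1 else 6
--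
--         for r, c in comp:
--             output[r][c] = color
--
--     return output
-- ===== SOURCE B (Python) =====
-- from collections import deque
--
-- def transform(grid_lst):
--     if not grid_lst or not grid_lst[0]:
--         return []
--     rows = len(grid_lst)
--     cols = len(grid_lst[0])
--     output = [row[:] for row in grid_lst]
--
--     # same component labeling as before (BFS over 4-neighbors on value 3)
--     visited = [[False] * cols for _ in range(rows)]
--     components = []
--     for i in range(rows):
--         for j in range(cols):
--             if grid_lst[i][j] == 3 and not visited[i][j]:
--                 comp = []
--                 q = deque([(i, j)])
--                 visited[i][j] = True
--                 while q:
--                     r, c = q.popleft()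
--                     comp.append((r, c))
--                     for dr, dc in ((-1, 0), (1, 0), (0, -1), (0, 1)):
--                         nr, nc = r + dr, c + dc
--                         if 0 <= nr < rows and 0 <= nc < cols and grid_lst[nr][nc] == 3 and not visited[nr][nc]:
--                             visited[nr][nc] = True
--                             q.append((nr, nc))
--                 components.append(comp)
--
--     for comp in components:
--         if len(comp) == 1:
--             color = 1
--         else:
--             cells = set(comp)
--
--             def neigh(p):
--                 r, c = p
--                 return [n for n in ((r - 1, c), (r + 1, c), (r, c - 1), (r, c + 1)) if n in cells]
--
--             degs = [len(neigh(p)) for p in comp]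
--             if degs.count(1) != 2 or any(d > 2 for d in degs):
--                 color = 2
--             else:
--                 # simple path: its bend count equals the number of L-corner cells,
--                 # i.e. degree-2 cells whose two neighbors are not collinear
--                 corners = 0
--                 for p in comp:
--                     ns = neigh(p)
--                     if len(ns) == 2 and (ns[0][0] + ns[1][0], ns[0][1] + ns[1][1]) != (2 * p[0], 2 * p[1]):
--                         corners += 1
--                 color = 1 if corners <= 1 else 6
--         for r, c in comp:
--             output[r][c] = color
--     return output
-- ===== Notes on version B (the rewrite author's own statement) =====
-- stated objective: alternative
-- what changed: The endpoint-to-endpoint path walk that threads prev and counts adjacent changes in a direction-character sequence is replaced by a local corner count: the number of degree-2 cells whose two neighbors are not collinear; the adjacency dict is replaced by per-cell neighbor lists filtered against the component set.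
import Mathlib
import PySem

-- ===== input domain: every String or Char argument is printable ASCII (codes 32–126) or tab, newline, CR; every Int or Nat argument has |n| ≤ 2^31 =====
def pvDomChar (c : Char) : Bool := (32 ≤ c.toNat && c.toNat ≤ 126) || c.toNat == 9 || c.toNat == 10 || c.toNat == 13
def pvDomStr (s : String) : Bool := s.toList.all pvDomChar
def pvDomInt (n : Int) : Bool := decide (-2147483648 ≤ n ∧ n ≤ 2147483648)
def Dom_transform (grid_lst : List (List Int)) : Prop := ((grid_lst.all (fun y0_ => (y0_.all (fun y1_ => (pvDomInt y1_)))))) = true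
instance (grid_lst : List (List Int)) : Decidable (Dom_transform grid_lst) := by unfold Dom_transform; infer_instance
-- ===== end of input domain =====

-- B replaces A's endpoint-to-endpoint walk (direction string + adjacent-change count) by a
-- local count of degree-2 cells whose two neighbors are not collinear (objective: alternative).

-- ===== PORT A =====
-- shared helpers (identical code in Source A and Source B: guard, grid access, BFS components, painting)
def pvDeltas : List (Int × Int) := [(-1, 0), (1, 0), (0, -1), (0, 1)]

def pvVal (g : List (List Int)) (r c : Int) : Int :=
  PySem.List.pyGetD (PySem.List.pyGetD g r []) c 0

def pvInb (rows cols r c : Int) : Bool :=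
  decide (0 ≤ r) && decide (r < rows) && decide (0 ≤ c) && decide (c < cols)

def pvVGet (vis : List (List Bool)) (r c : Int) : Bool :=
  PySem.List.pyGetD (PySem.List.pyGetD vis r []) c false

def pvVSet (vis : List (List Bool)) (r c : Int) : List (List Bool) :=
  PySem.List.pySetD vis r (PySem.List.pySetD (PySem.List.pyGetD vis r []) c true)

def pvSetCell (out : List (List Int)) (r c : Int) (v : Int) : List (List Int) :=
  PySem.List.pySetD out r (PySem.List.pySetD (PySem.List.pyGetD out r []) c v)

def pvBfs (g : List (List Int)) (rows cols : Int) :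
    Nat → List (Int × Int) → List (List Bool) → List (Int × Int) →
    List (Int × Int) × List (List Bool)
  | 0, _, vis, comp => (comp, vis)
  | _ + 1, [], vis, comp => (comp, vis)
  | fuel + 1, x :: qt, vis, comp =>
      let st := pvDeltas.foldl (fun (s : List (Int × Int) × List (List Bool)) d =>
        let nr := x.1 + d.1
        let nc := x.2 + d.2
        if pvInb rows cols nr nc && (pvVal g nr nc == 3) && !(pvVGet s.2 nr nc) then
          (s.1 ++ [(nr, nc)], pvVSet s.2 nr nc)
        else s) (qt, vis)
      pvBfs g rows cols fuel st.1 st.2 (comp ++ [x])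

def pvComponents (g : List (List Int)) (rows cols : Int) : List (List (Int × Int)) :=
  ((PySem.List.pyRange 0 rows 1).foldl (fun (s : List (List Bool) × List (List (Int × Int))) i =>
      (PySem.List.pyRange 0 cols 1).foldl (fun (s : List (List Bool) × List (List (Int × Int))) j =>
        if (pvVal g i j == 3) && !(pvVGet s.1 i j) then
          let r := pvBfs g rows cols (rows.toNat * cols.toNat + 1) [(i, j)] (pvVSet s.1 i j) []
          (r.2, s.2 ++ [r.1])
        else s) s)
    ((PySem.List.pyRange 0 rows 1).map (fun _ => List.replicate cols.toNat false), [])).2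

def pvPaint (out : List (List Int)) (comp : List (Int × Int)) (color : Int) : List (List Int) :=
  comp.foldl (fun o x => pvSetCell o x.1 x.2 color) out

-- A-side helpers
def pvAdjDict (g : List (List Int)) (rows cols : Int) (comp : List (Int × Int)) :
    PySem.Dict (Int × Int) (List (Int × Int)) :=
  comp.foldl (fun d cell =>
    pvDeltas.foldl (fun d dd =>
      let nr := cell.1 + dd.1
      let nc := cell.2 + dd.2
      if pvInb rows cols nr nc && (pvVal g nr nc == 3) && d.contains (nr, nc) then
        d.modify cell [] (fun l => l ++ [(nr, nc)])
      else d) d)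
    (comp.foldl (fun d cell => d.insert cell ([] : List (Int × Int))) PySem.Dict.empty)

def pvDirChar (dr dc : Int) : Char :=
  if dr == -1 then 'U' else if dr == 1 then 'D' else if dc == -1 then 'L' else 'R'

def pvWalk (F : (Int × Int) → List (Int × Int)) :
    Nat → Option (Int × Int) → (Int × Int) → List Char → List Char
  | 0, _, _, dirs => dirs
  | fuel + 1, prev, cur, dirs =>
      match (F cur).filter (fun nb => !(some nb == prev)) with
      | [] => dirs
      | nxt :: _ => pvWalk F fuel (some cur) nxt (dirs ++ [pvDirChar (nxt.1 - cur.1) (nxt.2 - cur.2)])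

def pvColorA (g : List (List Int)) (rows cols : Int) (comp : List (Int × Int)) : Int :=
  let adj := pvAdjDict g rows cols comp
  let degrees := comp.foldl (fun d cell => d.insert cell (PySem.List.len (adj.getD cell []))) PySem.Dict.empty
  let numEnds : Int := ((degrees.values.countP (fun dg => dg == 1) : Nat) : Int)
  let hasBranch : Bool := degrees.values.any (fun dg => decide (2 < dg))
  if !(numEnds == 2) || hasBranch then 2
  else
    match comp.find? (fun cell => degrees.getD cell 0 == 1) with
    | none => 2  -- unreachable: numEnds = 2 guarantees a degree-1 cell
    | some start =>
      let dirs := pvWalk (fun c => adj.getD c []) comp.length none start []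
      let bends : Int := (((PySem.List.pyRange 1 (PySem.List.len dirs) 1).countP
          (fun i => !(PySem.List.pyGetD dirs i ' ' == PySem.List.pyGetD dirs (i - 1) ' ')) : Nat) : Int)
      if bends ≤ 1 then 1 else 6

def pvProcessA (g : List (List Int)) (rows cols : Int) (out : List (List Int))
    (comp : List (Int × Int)) : List (List Int) :=
  if comp.length = 0 then out
  else if comp.length = 1 then pvSetCell out comp.headI.1 comp.headI.2 1
  else pvPaint out comp (pvColorA g rows cols comp)

def transform (grid_lst : List (List Int)) : List (List Int) :=
  match grid_lst with
  | [] => []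
  | g0 :: _ =>
    if g0.length = 0 then []
    else
      let rows := PySem.List.len grid_lst
      let cols := PySem.List.len g0
      let output := grid_lst.map (fun row => PySem.List.slice row none none)
      (pvComponents grid_lst rows cols).foldl
        (fun out comp => pvProcessA grid_lst rows cols out comp) output

-- ===== PORT B =====
def pvNbrs (p : Int × Int) : List (Int × Int) :=
  [(p.1 - 1, p.2), (p.1 + 1, p.2), (p.1, p.2 - 1), (p.1, p.2 + 1)]

def pvNeighB (cells : PySem.Set (Int × Int)) (p : Int × Int) : List (Int × Int) :=
  (pvNbrs p).filter (fun n => PySem.Set.contains cells n)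

def pvColorB (comp : List (Int × Int)) : Int :=
  let cells : PySem.Set (Int × Int) := PySem.Set.ofList comp
  let degs : List Int := comp.map (fun p => PySem.List.len (pvNeighB cells p))
  if !(((degs.count 1 : Nat) : Int) == 2) || degs.any (fun dg => decide (2 < dg)) then 2
  else
    let corners : Int := ((comp.countP (fun p =>
        let ns := pvNeighB cells p
        ns.length == 2 &&
          !(((ns.getD 0 (0, 0)).1 + (ns.getD 1 (0, 0)).1 == 2 * p.1) &&
            ((ns.getD 0 (0, 0)).2 + (ns.getD 1 (0, 0)).2 == 2 * p.2))) : Nat) : Int)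
    if corners ≤ 1 then 1 else 6

def pvProcessB (out : List (List Int)) (comp : List (Int × Int)) : List (List Int) :=
  if comp.length = 1 then pvPaint out comp 1
  else pvPaint out comp (pvColorB comp)

def transform_alt (grid_lst : List (List Int)) : List (List Int) :=
  match grid_lst with
  | [] => []
  | g0 :: _ =>
    if g0.length = 0 then []
    else
      let rows := PySem.List.len grid_lst
      let cols := PySem.List.len g0
      let output := grid_lst.map (fun row => PySem.List.slice row none none)
      (pvComponents grid_lst rows cols).foldl (fun out comp => pvProcessB out comp) output

-- ===== PRECONDITION & SPEC =====
-- Pre_ excludes exactly the ragged grids on which the Python A raises IndexError: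
-- some row shorter than the first row (the scan reads grid_lst[i][j] for all j < len(grid_lst[0])).
def Pre_transform (grid_lst : List (List Int)) : Prop :=
  ∀ row ∈ grid_lst, (grid_lst.headI).length ≤ row.length
instance (grid_lst : List (List Int)) : Decidable (Pre_transform grid_lst) := by
  unfold Pre_transform; infer_instance

def pvWitness_transform : List (List Int) := [[3, 0], [0, 3]]

def Spec_transform (grid_lst : List (List Int)) (out : List (List Int)) : Prop :=
  out = transform_alt grid_lst
instance (grid_lst : List (List Int)) (out : List (List Int)) : Decidable (Spec_transform grid_lst out) := by
  unfold Spec_transform; infer_instance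

-- ===== CLAIM (what is proved, stated in full; the proofs are below) =====
def Claim_equal_transform : Prop :=
  ∀ (grid_lst : List (List Int)), Dom_transform grid_lst → Pre_transform grid_lst →
    Spec_transform grid_lst (transform grid_lst)

-- ===== LEMMAS AND PROOFS =====

-- generic list helpers used by the proofs
theorem pvTwoMemLen {α : Type} {l : List α} {a b : α} (hab : a ≠ b) (ha : a ∈ l) (hb : b ∈ l) :
    2 ≤ l.length := by
  have hnd : ([a, b] : List α).Nodup := by simp [hab]
  have hsub : ([a, b] : List α) ⊆ l := by intro x hx; simp at hx; rcases hx with rfl | rfl <;> assumption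
  simpa using (hnd.subperm hsub).length_le

theorem pvThreeMemLen {α : Type} {l : List α} {a b c : α} (hab : a ≠ b) (hac : a ≠ c) (hbc : b ≠ c)
    (ha : a ∈ l) (hb : b ∈ l) (hc : c ∈ l) : 3 ≤ l.length := by
  have hnd : ([a, b, c] : List α).Nodup := by simp [hab, hac, hbc]
  have hsub : ([a, b, c] : List α) ⊆ l := by
    intro x hx; simp at hx; rcases hx with rfl | rfl | rfl <;> assumption
  simpa using (hnd.subperm hsub).length_le

theorem pvAllEqLen {α : Type} {l : List α} {a : α} (hnd : l.Nodup) (h : ∀ y ∈ l, y = a) :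
    l.length ≤ 1 := by
  match l, hnd, h with
  | [], _, _ => simp
  | [x], _, _ => simp
  | x :: y :: t, hnd, h =>
    have hxy : x = y := (h x (by simp)).trans (h y (by simp)).symm
    simp [hxy] at hnd

theorem pvPairList {α : Type} {l : List α} {a b : α} (hnd : l.Nodup) (hlen : l.length = 2)
    (ha : a ∈ l) (hb : b ∈ l) (hab : a ≠ b) : l = [a, b] ∨ l = [b, a] := by
  match l, hlen with
  | [x, y], _ =>
    simp at ha hb hnd
    rcases ha with rfl | rfl <;> rcases hb with rfl | rfl <;>
      first | exact absurd rfl hab | exact Or.inl rfl | exact Or.inr rfl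

theorem pvMemTwo {α : Type} {l : List α} {a b : α} (hnd : l.Nodup) (hlen : l.length ≤ 2)
    (ha : a ∈ l) (hb : b ∈ l) (hab : a ≠ b) : ∀ y ∈ l, y = a ∨ y = b := by
  have h2 : l.length = 2 := le_antisymm hlen (pvTwoMemLen hab ha hb)
  rcases pvPairList hnd h2 ha hb hab with rfl | rfl <;> intro y hy <;> simp at hy <;> tauto

theorem pvCountPIndex {α : Type} (l : List α) (d : α) (p : α → Bool) :
    l.countP p = (List.range l.length).countP (fun i => p (l.getD i d)) := by
  induction l with
  | nil => simp
  | cons x t ih =>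
    rw [List.length_cons, List.range_succ_eq_map, List.countP_cons, List.countP_cons,
      List.countP_map]
    simp only [List.getD_cons_zero, List.getD_cons_succ, Function.comp_def]
    rw [ih]

theorem pvFindCongr {α : Type} {l : List α} {p q : α → Bool} (h : ∀ x ∈ l, p x = q x) :
    l.find? p = l.find? q := by
  induction l with
  | nil => rfl
  | cons x t ih =>
    rw [List.find?_cons, List.find?_cons, h x (by simp)]
    cases q x <;> simp [ih fun y hy => h y (by simp [hy])]

-- geometry of the 4-neighborhood
theorem pvNbrs_eq_map (p : Int × Int) :
    pvNbrs p = pvDeltas.map (fun d => (p.1 + d.1, p.2 + d.2)) := by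
  simp [pvNbrs, pvDeltas, Prod.ext_iff]; omega

theorem pvNbrs_nodup (p : Int × Int) : (pvNbrs p).Nodup := by
  simp [pvNbrs, Prod.ext_iff]; omega

theorem mem_pvNbrs_symm {q p : Int × Int} (h : q ∈ pvNbrs p) : p ∈ pvNbrs q := by
  simp [pvNbrs, Prod.ext_iff] at h ⊢; omega

theorem not_mem_pvNbrs_self (p : Int × Int) : p ∉ pvNbrs p := by
  simp [pvNbrs, Prod.ext_iff]; omega

theorem pvDelta_mem {q p : Int × Int} (h : q ∈ pvNbrs p) :
    (q.1 - p.1, q.2 - p.2) ∈ pvDeltas := by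
  simp [pvNbrs, Prod.ext_iff] at h; simp [pvDeltas, Prod.ext_iff]; omega

theorem pvDirChar_inj {d1 d2 : Int × Int} (h1 : d1 ∈ pvDeltas) (h2 : d2 ∈ pvDeltas) :
    pvDirChar d1.1 d1.2 = pvDirChar d2.1 d2.2 ↔ d1 = d2 := by
  fin_cases h1 <;> fin_cases h2 <;> simp [pvDirChar]

-- the canonical adjacency function of a component
def pvAdjF (comp : List (Int × Int)) (p : Int × Int) : List (Int × Int) :=
  (pvNbrs p).filter (fun n => decide (n ∈ comp))

theorem mem_pvAdjF {comp : List (Int × Int)} {p q : Int × Int} :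
    q ∈ pvAdjF comp p ↔ q ∈ pvNbrs p ∧ q ∈ comp := by
  simp [pvAdjF]

theorem pvAdjF_nodup (comp : List (Int × Int)) (p : Int × Int) : (pvAdjF comp p).Nodup :=
  (pvNbrs_nodup p).filter _

theorem pvAdjF_symm {comp : List (Int × Int)} {p q : Int × Int} (hp : p ∈ comp)
    (h : q ∈ pvAdjF comp p) : p ∈ pvAdjF comp q := by
  rw [mem_pvAdjF] at h ⊢; exact ⟨mem_pvNbrs_symm h.1, hp⟩

theorem not_mem_pvAdjF_self (comp : List (Int × Int)) (p : Int × Int) : p ∉ pvAdjF comp p := by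
  rw [mem_pvAdjF]; intro h; exact not_mem_pvNbrs_self p h.1

theorem pvAdjF_sub_comp {comp : List (Int × Int)} {p q : Int × Int} (h : q ∈ pvAdjF comp p) :
    q ∈ comp := (mem_pvAdjF.1 h).2

theorem pvNeighB_eq (comp : List (Int × Int)) (p : Int × Int) :
    pvNeighB (PySem.Set.ofList comp) p = pvAdjF comp p := by
  unfold pvNeighB pvAdjF
  apply List.filter_congr
  intro n _
  have h := PySem.Set.contains_iff (PySem.Set.ofList comp) n
  rw [PySem.Set.mem_ofList] at h
  by_cases hn : n ∈ comp
  · simp only [hn, decide_true]; exact h.2 hn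
  · simp only [hn, decide_false]
    rcases hc : PySem.Set.contains (PySem.Set.ofList comp) n with _ | _
    · rfl
    · exact absurd (h.1 hc) hn


-- bounds / visited-matrix facts
def pvInbP (rows cols : Int) (x : Int × Int) : Prop :=
  0 ≤ x.1 ∧ x.1 < rows ∧ 0 ≤ x.2 ∧ x.2 < cols

theorem pvInb_iff {rows cols r c : Int} : pvInb rows cols r c = true ↔ pvInbP rows cols (r, c) := by
  simp [pvInb, pvInbP, and_assoc]

def pvVisShape (rows cols : Int) (vis : List (List Bool)) : Prop :=
  vis.length = rows.toNat ∧ ∀ row ∈ vis, row.length = cols.toNat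

theorem pvVGet_eq_getD {vis : List (List Bool)} {r c : Int} (hr : 0 ≤ r) (hc : 0 ≤ c) :
    pvVGet vis r c = (vis.getD r.toNat []).getD c.toNat false := by
  unfold pvVGet
  lift r to ℕ using hr with rn
  lift c to ℕ using hc with cn
  simp

theorem pvVSet_eq {vis : List (List Bool)} {r c : Int} (hr : 0 ≤ r) (hc : 0 ≤ c) :
    pvVSet vis r c = vis.set r.toNat ((vis.getD r.toNat []).set c.toNat true) := by
  unfold pvVSet
  lift r to ℕ using hr with rn
  lift c to ℕ using hc with cn
  simp

theorem getD_set_self_of_lt {α : Type} (l : List α) {n : Nat} (a d : α) (h : n < l.length) :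
    (l.set n a).getD n d = a := by
  rw [List.getD_eq_getElem _ _ (by simpa using h)]
  exact List.getElem_set_self (h := by simpa using h)

theorem getD_set_ne {α : Type} (l : List α) {n m : Nat} (a d : α) (h : n ≠ m) :
    (l.set n a).getD m d = l.getD m d := by
  rw [List.getD_eq_getElem?_getD, List.getElem?_set_ne h, ← List.getD_eq_getElem?_getD]

theorem pvVisShape_set {rows cols : Int} {vis : List (List Bool)} {r c : Int}
    (hs : pvVisShape rows cols vis) (h : pvInbP rows cols (r, c)) :
    pvVisShape rows cols (pvVSet vis r c) := by
  obtain ⟨h1, h2, h3, h4⟩ := h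
  rw [pvVSet_eq h1 h3]
  refine ⟨by simpa using hs.1, ?_⟩
  intro row hrow
  rcases List.mem_or_eq_of_mem_set hrow with hmem | rfl
  · exact hs.2 row hmem
  · rw [List.length_set]
    have hrn : r.toNat < vis.length := by rw [hs.1]; omega
    rw [List.getD_eq_getElem _ _ hrn]
    exact hs.2 _ (List.getElem_mem hrn)

theorem pvVGet_set_self {rows cols : Int} {vis : List (List Bool)} {r c : Int}
    (hs : pvVisShape rows cols vis) (h : pvInbP rows cols (r, c)) :
    pvVGet (pvVSet vis r c) r c = true := by
  obtain ⟨h1, h2, h3, h4⟩ := h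
  rw [pvVGet_eq_getD h1 h3, pvVSet_eq h1 h3]
  have hrn : r.toNat < vis.length := by rw [hs.1]; omega
  rw [getD_set_self_of_lt _ _ _ hrn]
  have hcn : c.toNat < (vis.getD r.toNat []).length := by
    rw [List.getD_eq_getElem _ _ hrn]
    rw [hs.2 _ (List.getElem_mem hrn)]; omega
  rw [getD_set_self_of_lt _ _ _ hcn]

theorem pvVGet_mono {vis : List (List Bool)} {r c r' c' : Int}
    (hr : 0 ≤ r) (hc : 0 ≤ c) (hr' : 0 ≤ r') (hc' : 0 ≤ c')
    (h : pvVGet vis r c = true) : pvVGet (pvVSet vis r' c') r c = true := by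
  rw [pvVGet_eq_getD hr hc] at h
  rw [pvVGet_eq_getD hr hc, pvVSet_eq hr' hc']
  by_cases hrr : r'.toNat = r.toNat
  · rw [hrr]
    by_cases hlt : r.toNat < vis.length
    · rw [getD_set_self_of_lt _ _ _ hlt]
      by_cases hcc : c'.toNat = c.toNat
      · rw [hcc]
        have hclt : c.toNat < (vis.getD r.toNat []).length := by
          by_contra hge
          rw [List.getD_eq_default _ _ (by omega)] at h
          exact absurd h (by simp)
        rw [getD_set_self_of_lt _ _ _ hclt]
      · rw [getD_set_ne _ _ _ hcc]
        exact h
    · rw [List.set_eq_of_length_le (by omega)]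
      exact h
  · rw [getD_set_ne _ _ _ hrr]
    exact h

-- order-connectivity of a BFS component: every later cell touches an earlier one
def pvOrdConn (comp : List (Int × Int)) : Prop :=
  ∀ i, (hi : i < comp.length) → i ≠ 0 →
    ∃ j, ∃ hj : j < comp.length, j < i ∧ comp[i] ∈ pvNbrs comp[j]

theorem pvOrdConn_nil : pvOrdConn [] := by intro i hi; simp at hi

theorem pvOrdConn_append {comp : List (Int × Int)} {x : Int × Int} (h : pvOrdConn comp)
    (hx : (∃ y ∈ comp, x ∈ pvNbrs y) ∨ comp = []) : pvOrdConn (comp ++ [x]) := by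
  intro i hi hne
  rw [List.length_append, List.length_singleton] at hi
  by_cases hil : i < comp.length
  · obtain ⟨j, hj, hji, hmem⟩ := h i hil hne
    exact ⟨j, by simp; omega, hji, by
      rwa [List.getElem_append_left hil, List.getElem_append_left hj]⟩
  · have hieq : i = comp.length := by omega
    subst hieq
    rcases hx with ⟨y, hy, hmem⟩ | rfl
    · obtain ⟨j, hj, rfl⟩ := List.mem_iff_getElem.1 hy
      refine ⟨j, by simp; omega, by omega, ?_⟩
      rw [List.getElem_append_left hj]
      simpa [List.getElem_append_right (le_refl comp.length)] using hmem
    · simp at hne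

def pvGoodComp (g : List (List Int)) (rows cols : Int) (comp : List (Int × Int)) : Prop :=
  comp.Nodup ∧ (∀ x ∈ comp, pvInbP rows cols x ∧ pvVal g x.1 x.2 = 3) ∧ pvOrdConn comp

def pvInvB (g : List (List Int)) (rows cols : Int) (q : List (Int × Int))
    (vis : List (List Bool)) (comp : List (Int × Int)) : Prop :=
  pvVisShape rows cols vis ∧
  (comp ++ q).Nodup ∧
  (∀ x ∈ comp ++ q, pvVGet vis x.1 x.2 = true) ∧
  (∀ x ∈ comp ++ q, pvInbP rows cols x ∧ pvVal g x.1 x.2 = 3) ∧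
  pvOrdConn comp ∧
  (∀ x ∈ q, (∃ y ∈ comp, x ∈ pvNbrs y) ∨ comp = []) ∧
  (comp = [] → q.length ≤ 1)

theorem pvBfsInnerStep (g : List (List Int)) (rows cols : Int) (x : Int × Int)
    (comp' : List (Int × Int)) (hx : x ∈ comp') (d : Int × Int) (hd : d ∈ pvDeltas)
    (s : List (Int × Int) × List (List Bool)) (hs : pvInvB g rows cols s.1 s.2 comp') :
    pvInvB g rows cols
      ((if pvInb rows cols (x.1 + d.1) (x.2 + d.2) && (pvVal g (x.1 + d.1) (x.2 + d.2) == 3)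
          && !(pvVGet s.2 (x.1 + d.1) (x.2 + d.2)) then
        (s.1 ++ [(x.1 + d.1, x.2 + d.2)], pvVSet s.2 (x.1 + d.1) (x.2 + d.2))
      else s)).1
      ((if pvInb rows cols (x.1 + d.1) (x.2 + d.2) && (pvVal g (x.1 + d.1) (x.2 + d.2) == 3)
          && !(pvVGet s.2 (x.1 + d.1) (x.2 + d.2)) then
        (s.1 ++ [(x.1 + d.1, x.2 + d.2)], pvVSet s.2 (x.1 + d.1) (x.2 + d.2))
      else s)).2 comp' := by
  by_cases hguard : (pvInb rows cols (x.1 + d.1) (x.2 + d.2)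
      && (pvVal g (x.1 + d.1) (x.2 + d.2) == 3)
      && !(pvVGet s.2 (x.1 + d.1) (x.2 + d.2))) = true
  swap
  · rw [if_neg hguard]; exact hs
  rw [if_pos hguard]
  rw [Bool.and_eq_true, Bool.and_eq_true] at hguard
  obtain ⟨⟨hinb, hval⟩, hnvis⟩ := hguard
  rw [beq_iff_eq] at hval
  rw [Bool.not_eq_eq_eq_not, Bool.not_true] at hnvis
  rw [pvInb_iff] at hinb
  set n : Int × Int := (x.1 + d.1, x.2 + d.2) with hn
  obtain ⟨hshape, hnd, hvis, hvals, hord, hcon, hone⟩ := hs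
  have hfresh : n ∉ comp' ++ s.1 := by
    intro hmem
    rw [hvis n hmem] at hnvis
    exact absurd hnvis (by simp)
  have hnn1 : 0 ≤ n.1 := hinb.1
  have hnn2 : 0 ≤ n.2 := hinb.2.2.1
  refine ⟨pvVisShape_set hshape hinb, ?_, ?_, ?_, hord, ?_, ?_⟩
  · have he : comp' ++ (s.1 ++ [n]) = (comp' ++ s.1) ++ [n] := (List.append_assoc _ _ _).symm
    rw [he]
    refine List.Nodup.append hnd (List.nodup_singleton n) ?_
    simp only [List.disjoint_singleton]
    exact hfresh
  · intro y hy
    have he : comp' ++ (s.1 ++ [n]) = (comp' ++ s.1) ++ [n] := (List.append_assoc _ _ _).symm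
    rw [he] at hy
    rcases List.mem_append.1 hy with hmem | hsing
    · have h0 := hvals y hmem
      exact pvVGet_mono h0.1.1 h0.1.2.2.1 hnn1 hnn2 (hvis y hmem)
    · simp only [List.mem_singleton] at hsing
      subst hsing
      exact pvVGet_set_self hshape hinb
  · intro y hy
    have he : comp' ++ (s.1 ++ [n]) = (comp' ++ s.1) ++ [n] := (List.append_assoc _ _ _).symm
    rw [he] at hy
    rcases List.mem_append.1 hy with hmem | hsing
    · exact hvals y hmem
    · simp only [List.mem_singleton] at hsing
      subst hsing
      exact ⟨hinb, hval⟩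
  · intro y hy
    rcases List.mem_append.1 hy with hmem | hsing
    · exact hcon y hmem
    · simp only [List.mem_singleton] at hsing
      subst hsing
      left
      exact ⟨x, hx, by rw [pvNbrs_eq_map, List.mem_map]; exact ⟨d, hd, rfl⟩⟩
  · intro hc
    exact absurd hx (by simp [hc])

theorem pvBfsInner (g : List (List Int)) (rows cols : Int) (x : Int × Int)
    (comp' : List (Int × Int)) (hx : x ∈ comp') :
    ∀ ds : List (Int × Int), (∀ d ∈ ds, d ∈ pvDeltas) →
    ∀ s : List (Int × Int) × List (List Bool), pvInvB g rows cols s.1 s.2 comp' →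
    pvInvB g rows cols
      (ds.foldl (fun (s : List (Int × Int) × List (List Bool)) d =>
        let nr := x.1 + d.1
        let nc := x.2 + d.2
        if pvInb rows cols nr nc && (pvVal g nr nc == 3) && !(pvVGet s.2 nr nc) then
          (s.1 ++ [(nr, nc)], pvVSet s.2 nr nc)
        else s) s).1
      (ds.foldl (fun (s : List (Int × Int) × List (List Bool)) d =>
        let nr := x.1 + d.1
        let nc := x.2 + d.2
        if pvInb rows cols nr nc && (pvVal g nr nc == 3) && !(pvVGet s.2 nr nc) then
          (s.1 ++ [(nr, nc)], pvVSet s.2 nr nc)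
        else s) s).2 comp' := by
  intro ds
  induction ds with
  | nil => intro _ s hs; exact hs
  | cons d ds ih =>
    intro hds s hs
    rw [List.foldl_cons]
    exact ih (fun e he => hds e (by simp [he]))
      _ (pvBfsInnerStep g rows cols x comp' hx d (hds d (by simp)) s hs)

theorem pvBfs_good (g : List (List Int)) (rows cols : Int) :
    ∀ (fuel : Nat) (q : List (Int × Int)) (vis : List (List Bool)) (comp : List (Int × Int)),
    pvInvB g rows cols q vis comp →
    pvGoodComp g rows cols (pvBfs g rows cols fuel q vis comp).1 ∧
      pvVisShape rows cols (pvBfs g rows cols fuel q vis comp).2 := by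
  intro fuel
  induction fuel with
  | zero =>
    intro q vis comp hinv
    obtain ⟨hshape, hnd, _, hvals, hord, _, _⟩ := hinv
    exact ⟨⟨(List.sublist_append_left comp q).nodup hnd,
      fun y hy => hvals y (List.mem_append.2 (Or.inl hy)), hord⟩, hshape⟩
  | succ fuel ih =>
    intro q vis comp hinv
    match q with
    | [] =>
      obtain ⟨hshape, hnd, _, hvals, hord, _, _⟩ := hinv
      exact ⟨⟨by simpa using hnd, fun y hy => hvals y (by simpa using hy), hord⟩, hshape⟩
    | x :: qt =>
      obtain ⟨hshape, hnd, hvis, hvals, hord, hcon, hone⟩ := hinv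
      have hxq : x ∈ comp ++ x :: qt := by simp
      have hreassoc : comp ++ x :: qt = (comp ++ [x]) ++ qt := by simp
      have hinv' : pvInvB g rows cols qt vis (comp ++ [x]) := by
        refine ⟨hshape, by rwa [← hreassoc], ?_, ?_, ?_, ?_, ?_⟩
        · intro y hy; exact hvis y (by rwa [hreassoc])
        · intro y hy; exact hvals y (by rwa [hreassoc])
        · exact pvOrdConn_append hord (by
            rcases hcon x (by simp) with h | h
            · exact Or.inl h
            · exact Or.inr h)
        · intro y hy
          rcases hcon y (by simp [hy]) with ⟨z, hz, hmem⟩ | hc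
          · exact Or.inl ⟨z, by simp [hz], hmem⟩
          · subst hc
            have := hone rfl
            simp at this
            simp [this] at hy
        · intro hc
          exact absurd hc (by simp)
      have hstep := pvBfsInner g rows cols x (comp ++ [x]) (by simp) pvDeltas
        (fun d hd => hd) (qt, vis) hinv'
      show pvGoodComp g rows cols (pvBfs g rows cols fuel _ _ (comp ++ [x])).1 ∧ _
      exact ih _ _ _ hstep

theorem pvComponents_good (g : List (List Int)) (rows cols : Int) :
    ∀ comp ∈ pvComponents g rows cols, pvGoodComp g rows cols comp := by
  unfold pvComponents
  have hmain : ∀ s : List (List Bool) × List (List (Int × Int)),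
      (pvVisShape rows cols s.1 ∧ ∀ c ∈ s.2, pvGoodComp g rows cols c) →
      pvVisShape rows cols ((PySem.List.pyRange 0 rows 1).foldl (fun (s : List (List Bool) × List (List (Int × Int))) i =>
        (PySem.List.pyRange 0 cols 1).foldl (fun (s : List (List Bool) × List (List (Int × Int))) j =>
          if (pvVal g i j == 3) && !(pvVGet s.1 i j) then
            let r := pvBfs g rows cols (rows.toNat * cols.toNat + 1) [(i, j)] (pvVSet s.1 i j) []
            (r.2, s.2 ++ [r.1])
          else s) s) s).1 ∧
      ∀ c ∈ ((PySem.List.pyRange 0 rows 1).foldl (fun (s : List (List Bool) × List (List (Int × Int))) i =>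
        (PySem.List.pyRange 0 cols 1).foldl (fun (s : List (List Bool) × List (List (Int × Int))) j =>
          if (pvVal g i j == 3) && !(pvVGet s.1 i j) then
            let r := pvBfs g rows cols (rows.toNat * cols.toNat + 1) [(i, j)] (pvVSet s.1 i j) []
            (r.2, s.2 ++ [r.1])
          else s) s) s).2, pvGoodComp g rows cols c := by
    intro s hs
    refine List.foldlRecOn (motive := fun (st : List (List Bool) × List (List (Int × Int))) =>
        pvVisShape rows cols st.1 ∧ ∀ c ∈ st.2, pvGoodComp g rows cols c) _ _ hs ?_
    intro b hb i hi
    refine List.foldlRecOn (motive := fun (st : List (List Bool) × List (List (Int × Int))) =>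
        pvVisShape rows cols st.1 ∧ ∀ c ∈ st.2, pvGoodComp g rows cols c) _ _ hb ?_
    intro b2 hb2 j hj
    by_cases hguard : ((pvVal g i j == 3) && !(pvVGet b2.1 i j)) = true
    swap
    · simpa [hguard] using hb2
    simp only [hguard, if_pos]
    rw [PySem.List.mem_pyRange_one] at hi hj
    simp only [Bool.and_eq_true, beq_iff_eq, Bool.not_eq_eq_eq_not, Bool.not_true] at hguard
    have hinb : pvInbP rows cols (i, j) := ⟨hi.1, hi.2, hj.1, hj.2⟩
    have hinit : pvInvB g rows cols [(i, j)] (pvVSet b2.1 i j) [] := by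
      refine ⟨pvVisShape_set hb2.1 hinb, by simp, ?_, ?_, pvOrdConn_nil, ?_, by simp⟩
      · intro y hy; simp at hy; subst hy
        exact pvVGet_set_self hb2.1 hinb
      · intro y hy; simp at hy; subst hy
        exact ⟨hinb, hguard.1⟩
      · intro y hy; exact Or.inr rfl
    have hres := pvBfs_good g rows cols (rows.toNat * cols.toNat + 1) [(i, j)] (pvVSet b2.1 i j) [] hinit
    refine ⟨hres.2, ?_⟩
    intro c hc
    rcases List.mem_append.1 hc with hmem | hsing
    · exact hb2.2 c hmem
    · simp at hsing; subst hsing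
      exact hres.1
  have hinit : pvVisShape rows cols ((PySem.List.pyRange 0 rows 1).map (fun _ => List.replicate cols.toNat false)) ∧
      ∀ c ∈ ([] : List (List (Int × Int))), pvGoodComp g rows cols c := by
    constructor
    · constructor
      · simp [PySem.List.length_pyRange_one]
      · intro row hrow
        simp at hrow
        obtain ⟨_, _, rfl⟩ := hrow
        simp
    · simp
  intro comp hcomp
  exact (hmain _ hinit).2 comp hcomp


-- characterization of A's adjacency dict and degree dict
def pvAdjStep (g : List (List Int)) (rows cols : Int) (cell : Int × Int)
    (d : PySem.Dict (Int × Int) (List (Int × Int))) (dd : Int × Int) :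
    PySem.Dict (Int × Int) (List (Int × Int)) :=
  let nr := cell.1 + dd.1
  let nc := cell.2 + dd.2
  if pvInb rows cols nr nc && (pvVal g nr nc == 3) && d.contains (nr, nc) then
    d.modify cell [] (fun l => l ++ [(nr, nc)])
  else d

def pvBCond (g : List (List Int)) (rows cols : Int) (comp : List (Int × Int))
    (cell dd : Int × Int) : Bool :=
  pvInb rows cols (cell.1 + dd.1) (cell.2 + dd.2)
    && (pvVal g (cell.1 + dd.1) (cell.2 + dd.2) == 3)
    && decide ((cell.1 + dd.1, cell.2 + dd.2) ∈ comp)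

theorem pvAdjInner (g : List (List Int)) (rows cols : Int) (comp : List (Int × Int))
    (cell : Int × Int) (hcell : cell ∈ comp) :
    ∀ (ds : List (Int × Int)) (d : PySem.Dict (Int × Int) (List (Int × Int))),
    d.keys = comp →
    (ds.foldl (pvAdjStep g rows cols cell) d).keys = comp ∧
    (ds.foldl (pvAdjStep g rows cols cell) d).getD cell [] =
      d.getD cell [] ++ (ds.filter (pvBCond g rows cols comp cell)).map
        (fun dd => (cell.1 + dd.1, cell.2 + dd.2)) ∧
    (∀ p, p ≠ cell → (ds.foldl (pvAdjStep g rows cols cell) d).getD p [] = d.getD p []) := by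
  intro ds
  induction ds with
  | nil => intro d hk; exact ⟨hk, by simp, fun p _ => rfl⟩
  | cons dd ds ih =>
    intro d hk
    have hcont : d.contains (cell.1 + dd.1, cell.2 + dd.2)
        = decide ((cell.1 + dd.1, cell.2 + dd.2) ∈ comp) := by
      rw [PySem.Dict.contains_eq_decide_mem_keys, hk]
    have hstep : pvAdjStep g rows cols cell d dd =
        if pvBCond g rows cols comp cell dd then
          d.modify cell [] (fun l => l ++ [(cell.1 + dd.1, cell.2 + dd.2)])
        else d := by
      unfold pvAdjStep pvBCond
      dsimp only
      rw [hcont]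
    rw [List.foldl_cons, hstep, List.filter_cons]
    by_cases hb : pvBCond g rows cols comp cell dd = true
    · simp only [hb, if_pos]
      have hk' : (d.modify cell [] (fun l => l ++ [(cell.1 + dd.1, cell.2 + dd.2)])).keys = comp := by
        rw [PySem.Dict.keys_modify, PySem.Dict.keys_insert_of_contains, hk]
        rw [PySem.Dict.contains_eq_decide_mem_keys, hk]
        simpa using hcell
      obtain ⟨ihk, ihself, ihother⟩ := ih _ hk'
      refine ⟨ihk, ?_, ?_⟩
      · rw [ihself, PySem.Dict.getD_modify_self]
        simp
      · intro p hp
        rw [ihother p hp, PySem.Dict.getD_modify_of_ne _ _ _ hp]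
    · simp only [hb, if_neg, Bool.false_eq_true, not_false_eq_true]
      exact ih d hk

theorem pvAdjOuterNotMem (g : List (List Int)) (rows cols : Int) (comp : List (Int × Int)) :
    ∀ (l : List (Int × Int)) (d : PySem.Dict (Int × Int) (List (Int × Int))),
    (∀ c ∈ l, c ∈ comp) → d.keys = comp → ∀ p, p ∉ l →
    (l.foldl (fun d cell => pvDeltas.foldl (pvAdjStep g rows cols cell) d) d).getD p [] = d.getD p [] := by
  intro l
  induction l with
  | nil => intro d _ _ p _; rfl
  | cons c t ih =>
    intro d hl hk p hp
    rw [List.foldl_cons]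
    have hinner := pvAdjInner g rows cols comp c (hl c (by simp)) pvDeltas d hk
    rw [ih _ (fun x hx => hl x (by simp [hx])) hinner.1 p (fun hx => hp (by simp [hx]))]
    exact hinner.2.2 p (fun he => hp (by simp [he]))

theorem pvAdjOuterMem (g : List (List Int)) (rows cols : Int) (comp : List (Int × Int)) :
    ∀ (l : List (Int × Int)) (d : PySem.Dict (Int × Int) (List (Int × Int))),
    l.Nodup → (∀ c ∈ l, c ∈ comp) → d.keys = comp → ∀ p ∈ l,
    (l.foldl (fun d cell => pvDeltas.foldl (pvAdjStep g rows cols cell) d) d).getD p [] =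
      d.getD p [] ++ (pvDeltas.filter (pvBCond g rows cols comp p)).map
        (fun dd => (p.1 + dd.1, p.2 + dd.2)) := by
  intro l
  induction l with
  | nil => intro d _ _ _ p hp; simp at hp
  | cons c t ih =>
    intro d hnd hl hk p hp
    rw [List.foldl_cons]
    have hinner := pvAdjInner g rows cols comp c (hl c (by simp)) pvDeltas d hk
    rcases List.mem_cons.1 hp with rfl | hpt
    · rw [pvAdjOuterNotMem g rows cols comp t _ (fun x hx => hl x (by simp [hx])) hinner.1 p
        (by simp at hnd; exact hnd.1)]
      exact hinner.2.1
    · have hpc : p ≠ c := by rintro rfl; simp at hnd; exact hnd.1 hpt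
      rw [ih _ (by simp at hnd; exact hnd.2) (fun x hx => hl x (by simp [hx])) hinner.1 p hpt]
      rw [hinner.2.2 p hpc]

theorem pvAdjInitKeys (comp : List (Int × Int)) (hnd : comp.Nodup) :
    (comp.foldl (fun d cell => d.insert cell ([] : List (Int × Int))) PySem.Dict.empty).keys = comp := by
  rw [PySem.Dict.keys_foldl_insert comp (fun _ _ => ([] : List (Int × Int)))]
  rw [PySem.Dict.keys_empty, PySem.Set.update_nil_left, PySem.Set.ofList_eq_self_of_nodup _ hnd]

theorem pvAdjInitGetD (comp : List (Int × Int)) :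
    ∀ (d : PySem.Dict (Int × Int) (List (Int × Int))), (∀ p, d.getD p [] = []) → ∀ p,
    (comp.foldl (fun d cell => d.insert cell ([] : List (Int × Int))) d).getD p [] = [] := by
  induction comp with
  | nil => intro d hd p; exact hd p
  | cons c t ih =>
    intro d hd p
    rw [List.foldl_cons]
    refine ih _ ?_ p
    intro p'
    rw [PySem.Dict.getD_insert]
    split <;> simp [hd]

theorem pvAdjDict_getD (g : List (List Int)) (rows cols : Int) (comp : List (Int × Int))
    (hnd : comp.Nodup) (hvals : ∀ x ∈ comp, pvInbP rows cols x ∧ pvVal g x.1 x.2 = 3)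
    (p : Int × Int) (hp : p ∈ comp) :
    (pvAdjDict g rows cols comp).getD p [] = pvAdjF comp p := by
  have hdict : pvAdjDict g rows cols comp =
      comp.foldl (fun d cell => pvDeltas.foldl (pvAdjStep g rows cols cell) d)
        (comp.foldl (fun d cell => d.insert cell ([] : List (Int × Int))) PySem.Dict.empty) := rfl
  rw [hdict, pvAdjOuterMem g rows cols comp comp _ hnd (fun c hc => hc) (pvAdjInitKeys comp hnd) p hp,
    pvAdjInitGetD comp PySem.Dict.empty (fun _ => rfl) p, List.nil_append]
  unfold pvAdjF
  rw [pvNbrs_eq_map p, List.filter_map]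
  congr 1
  apply List.filter_congr
  intro dd _
  simp only [Function.comp_def]
  by_cases hmem : (p.1 + dd.1, p.2 + dd.2) ∈ comp
  · have hv := hvals _ hmem
    unfold pvBCond
    rw [pvInb_iff.2 hv.1]
    simp [hmem, hv.2]
  · unfold pvBCond
    simp [hmem]

theorem pvDegrees_items (adj : PySem.Dict (Int × Int) (List (Int × Int)))
    (comp : List (Int × Int)) (hnd : comp.Nodup) :
    (comp.foldl (fun d cell => d.insert cell (PySem.List.len (adj.getD cell []))) PySem.Dict.empty).items
      = comp.map (fun c => (c, PySem.List.len (adj.getD c []))) := by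
  have h := PySem.Dict.items_foldl_insert_fresh comp (fun a => a)
    (fun a => PySem.List.len (adj.getD a [])) PySem.Dict.empty
    (fun a _ => by simp [PySem.Dict.contains_empty]) (by simpa using hnd)
  simpa using h

theorem pvDegrees_values (adj : PySem.Dict (Int × Int) (List (Int × Int)))
    (comp : List (Int × Int)) (hnd : comp.Nodup) :
    (comp.foldl (fun d cell => d.insert cell (PySem.List.len (adj.getD cell []))) PySem.Dict.empty).values
      = comp.map (fun c => PySem.List.len (adj.getD c [])) := by
  show ((comp.foldl (fun d cell => d.insert cell (PySem.List.len (adj.getD cell []))) PySem.Dict.empty).items.map (fun p => p.2)) = _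
  rw [pvDegrees_items adj comp hnd, List.map_map]
  rfl

theorem pvDegrees_getD (adj : PySem.Dict (Int × Int) (List (Int × Int)))
    (comp : List (Int × Int)) (hnd : comp.Nodup) (c : Int × Int) (hc : c ∈ comp) :
    (comp.foldl (fun d cell => d.insert cell (PySem.List.len (adj.getD cell []))) PySem.Dict.empty).getD c 0
      = PySem.List.len (adj.getD c []) := by
  have hkeys : (comp.foldl (fun d cell => d.insert cell (PySem.List.len (adj.getD cell []))) PySem.Dict.empty).keys.Nodup := by
    show ((comp.foldl (fun d cell => d.insert cell (PySem.List.len (adj.getD cell []))) PySem.Dict.empty).items.map (fun p => p.1)).Nodup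
    rw [pvDegrees_items adj comp hnd, List.map_map]
    have : ((fun (p : (Int × Int) × Int) => p.1) ∘ fun c => (c, PySem.List.len (adj.getD c []))) = fun c => c := rfl
    rw [this]
    simpa using hnd
  refine PySem.Dict.getD_of_mem_items _ ?_ hkeys 0
  rw [pvDegrees_items adj comp hnd, List.mem_map]
  exact ⟨c, hc, rfl⟩


-- the forward path of A's walk and its direction characters
def pvPath (F : (Int × Int) → List (Int × Int)) : Nat → Option (Int × Int) → (Int × Int) → List (Int × Int)
  | 0, _, cur => [cur]
  | f + 1, prev, cur =>
    match (F cur).filter (fun nb => !(some nb == prev)) with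
    | [] => [cur]
    | nxt :: _ => cur :: pvPath F f (some cur) nxt

def pvDirsOf : List (Int × Int) → List Char
  | a :: b :: t => pvDirChar (b.1 - a.1) (b.2 - a.2) :: pvDirsOf (b :: t)
  | _ => []

theorem pvPath_cons (F : (Int × Int) → List (Int × Int)) (f : Nat) (prev : Option (Int × Int))
    (cur : Int × Int) : ∃ rest, pvPath F f prev cur = cur :: rest := by
  cases f with
  | zero => exact ⟨[], rfl⟩
  | succ f =>
    unfold pvPath
    cases h : (F cur).filter (fun nb => !(some nb == prev)) with
    | nil => exact ⟨[], rfl⟩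
    | cons nxt t => exact ⟨pvPath F f (some cur) nxt, rfl⟩

theorem pvWalk_eq_dirsOf (F : (Int × Int) → List (Int × Int)) :
    ∀ (f : Nat) (prev : Option (Int × Int)) (cur : Int × Int) (dirs : List Char),
    pvWalk F f prev cur dirs = dirs ++ pvDirsOf (pvPath F f prev cur) := by
  intro f
  induction f with
  | zero => intro prev cur dirs; simp [pvWalk, pvPath, pvDirsOf]
  | succ f ih =>
    intro prev cur dirs
    unfold pvWalk pvPath
    cases h : (F cur).filter (fun nb => !(some nb == prev)) with
    | nil => simp [pvDirsOf]
    | cons nxt t =>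
      show pvWalk F f (some cur) nxt (dirs ++ [pvDirChar (nxt.1 - cur.1) (nxt.2 - cur.2)])
        = dirs ++ pvDirsOf (cur :: pvPath F f (some cur) nxt)
      rw [ih]
      obtain ⟨rest, hr⟩ := pvPath_cons F f (some cur) nxt
      rw [hr]
      show dirs ++ [pvDirChar (nxt.1 - cur.1) (nxt.2 - cur.2)] ++ pvDirsOf (nxt :: rest)
        = dirs ++ pvDirsOf (cur :: nxt :: rest)
      rw [pvDirsOf, List.append_assoc]
      rfl

theorem pvLenOne {α : Type} {l : List α} {a : α} (h1 : l.length = 1) (ha : a ∈ l) :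
    ∀ y ∈ l, y = a := by
  match l, h1 with
  | [x], _ =>
    simp at ha
    subst ha
    intro y hy
    simpa using hy

theorem pvNoRevisit (comp : List (Int × Int))
    (hdeg2 : ∀ p ∈ comp, (pvAdjF comp p).length ≤ 2)
    (start : Int × Int) (hstartdeg : (pvAdjF comp start).length = 1)
    (pre : List (Int × Int)) (cur n : Int × Int)
    (hnd : (pre ++ [cur]).Nodup)
    (hmem : ∀ x ∈ pre ++ [cur], x ∈ comp)
    (hch : (pre ++ [cur]).IsChain (fun a b => b ∈ pvAdjF comp a))
    (hhead : (pre ++ [cur]).head? = some start)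
    (hn : n ∈ pvAdjF comp cur)
    (hprev : some n ≠ pre.getLast?) :
    n ∉ pre ++ [cur] := by
  intro hmemn
  have hncur : n ≠ cur := fun he => not_mem_pvAdjF_self comp cur (he ▸ hn)
  have hnpre : n ∈ pre := by
    rcases List.mem_append.1 hmemn with h | h
    · exact h
    · simp at h; exact absurd h hncur
  obtain ⟨i, hi, hieq⟩ := List.mem_iff_getElem.1 hnpre
  have hlen : (pre ++ [cur]).length = pre.length + 1 := by simp
  have hiL : i < (pre ++ [cur]).length := by omega
  have hLi : (pre ++ [cur])[i] = n := by rw [List.getElem_append_left hi]; exact hieq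
  have hcurL : (pre ++ [cur])[pre.length]'(by omega) = cur := List.getElem_concat_length rfl _
  have hchain := List.isChain_iff_getElem.1 hch
  have hcuradjn : cur ∈ pvAdjF comp n := pvAdjF_symm (hmem cur (by simp)) hn
  have hprelen : 0 < pre.length := List.length_pos_of_mem hnpre
  have hlast : pre.getLast? = some (pre[pre.length - 1]'(by omega)) := by
    rw [List.getLast?_eq_getElem?, List.getElem?_eq_getElem (by omega)]
  have hine : i ≠ pre.length - 1 := by
    rintro rfl
    exact hprev (by rw [hlast, hieq])
  by_cases hio : i = 0
  · subst hio
    have hstarteq : (pre ++ [cur])[0]'(by omega) = start := by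
      have h0 : (pre ++ [cur]).head? = (pre ++ [cur])[0]? := by
        rw [List.head?_eq_getElem?]
      rw [h0, List.getElem?_eq_getElem (by omega)] at hhead
      simpa using hhead
    have hnstart : n = start := by rw [← hLi, hstarteq]
    have hpre2 : 2 ≤ pre.length := by omega
    have hs : (pre ++ [cur])[1]'(by omega) ∈ pvAdjF comp ((pre ++ [cur])[0]'(by omega)) :=
      hchain 0 (by omega)
    rw [hstarteq, ← hnstart] at hs
    have hsne : (pre ++ [cur])[1]'(by omega) ≠ cur := by
      have hne2 : ¬((pre ++ [cur])[1]'(by omega) = (pre ++ [cur])[pre.length]'(by omega)) := by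
        rw [hnd.getElem_inj_iff]; omega
      rwa [hcurL] at hne2
    have := pvTwoMemLen hsne hs hcuradjn
    rw [← hnstart] at hstartdeg
    omega
  · have hu : (pre ++ [cur])[i - 1]'(by omega) ∈ pvAdjF comp n := by
      have hc := hchain (i - 1) (by omega)
      have hidx : i - 1 + 1 = i := by omega
      rw [show (pre ++ [cur])[i - 1 + 1]'(by omega) = (pre ++ [cur])[i]'hiL from by
        simp only [hidx]] at hc
      rw [hLi] at hc
      exact pvAdjF_symm (hmem _ (List.getElem_mem _)) hc
    have hvlt : i + 1 < (pre ++ [cur]).length := by omega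
    have hv : (pre ++ [cur])[i + 1]'hvlt ∈ pvAdjF comp n := by
      have hc := hchain i (by omega)
      rwa [hLi] at hc
    have hidőne : i + 1 ≠ pre.length := by omega
    have hvpre : i + 1 < pre.length := by omega
    have huv : ¬((pre ++ [cur])[i - 1]'(by omega) = (pre ++ [cur])[i + 1]'hvlt) := by
      rw [hnd.getElem_inj_iff]
      omega
    have hucur : (pre ++ [cur])[i - 1]'(by omega) ≠ cur := by
      have hne2 : ¬((pre ++ [cur])[i - 1]'(by omega) = (pre ++ [cur])[pre.length]'(by omega)) := by
        rw [hnd.getElem_inj_iff]; omega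
      rwa [hcurL] at hne2
    have hvcur : (pre ++ [cur])[i + 1]'hvlt ≠ cur := by
      have hne2 : ¬((pre ++ [cur])[i + 1]'hvlt = (pre ++ [cur])[pre.length]'(by omega)) := by
        rw [hnd.getElem_inj_iff]; omega
      rwa [hcurL] at hne2
    have h3 := pvThreeMemLen huv hucur hvcur hu hv hcuradjn
    have h2 := hdeg2 n (hmem n hmemn)
    omega


theorem pvPathTerm (comp : List (Int × Int)) (start : Int × Int)
    (pre : List (Int × Int)) (cur : Int × Int)
    (hnd : (pre ++ [cur]).Nodup)
    (hmem : ∀ x ∈ pre ++ [cur], x ∈ comp)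
    (hch : (pre ++ [cur]).IsChain (fun a b => b ∈ pvAdjF comp a))
    (hclo : ∀ x ∈ pre, ∀ y ∈ pvAdjF comp x, y ∈ pre ++ [cur])
    (hhead : (pre ++ [cur]).head? = some start)
    (hstop : ∀ y ∈ pvAdjF comp cur, some y = pre.getLast?) :
    (pre ++ [cur]).Nodup ∧
    (∀ x ∈ pre ++ [cur], x ∈ comp) ∧
    (pre ++ [cur]).IsChain (fun a b => b ∈ pvAdjF comp a) ∧
    (∀ x ∈ pre ++ [cur], ∀ y ∈ pvAdjF comp x, y ∈ pre ++ [cur]) ∧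
    (pre ++ [cur]).head? = some start ∧
    ∀ h : (pre ++ [cur]) ≠ [], (pvAdjF comp ((pre ++ [cur]).getLast h)).length ≤ 1 := by
  have hcurstop : ∀ y ∈ pvAdjF comp cur, y ∈ pre ++ [cur] := by
    intro y hy
    have hsome := hstop y hy
    have hpre : pre ≠ [] := by
      intro he
      rw [he] at hsome
      simp at hsome
    rw [List.getLast?_eq_some_getLast hpre] at hsome
    have hyeq : y = pre.getLast hpre := by injection hsome
    rw [hyeq]
    exact List.mem_append.2 (Or.inl (List.getLast_mem hpre))
  refine ⟨hnd, hmem, hch, ?_, hhead, ?_⟩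
  · intro x hx y hy
    rcases List.mem_append.1 hx with hxpre | hxcur
    · exact hclo x hxpre y hy
    · simp only [List.mem_singleton] at hxcur
      subst hxcur
      exact hcurstop y hy
  · intro h
    rw [List.getLast_concat]
    by_cases hpre : pre = []
    · subst hpre
      have hempty : pvAdjF comp cur = [] := by
        rw [List.eq_nil_iff_forall_not_mem]
        intro y hy
        have := hstop y hy
        simp at this
      rw [hempty]
      simp
    · have hall : ∀ y ∈ pvAdjF comp cur, y = pre.getLast hpre := by
        intro y hy
        have hsome := hstop y hy
        rw [List.getLast?_eq_some_getLast hpre] at hsome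
        injection hsome
      exact pvAllEqLen (pvAdjF_nodup comp cur) hall

theorem pvPathSpec (comp : List (Int × Int)) (F : (Int × Int) → List (Int × Int))
    (hF : ∀ p ∈ comp, F p = pvAdjF comp p)
    (hdeg2 : ∀ p ∈ comp, (pvAdjF comp p).length ≤ 2)
    (start : Int × Int) (hstartdeg : (pvAdjF comp start).length = 1) :
    ∀ (f : Nat) (pre : List (Int × Int)) (cur : Int × Int),
    (pre ++ [cur]).Nodup →
    (∀ x ∈ pre ++ [cur], x ∈ comp) →
    (pre ++ [cur]).IsChain (fun a b => b ∈ pvAdjF comp a) →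
    (∀ x ∈ pre, ∀ y ∈ pvAdjF comp x, y ∈ pre ++ [cur]) →
    (pre ++ [cur]).head? = some start →
    comp.length ≤ f + pre.length + 1 →
    (pre ++ pvPath F f pre.getLast? cur).Nodup ∧
    (∀ x ∈ pre ++ pvPath F f pre.getLast? cur, x ∈ comp) ∧
    (pre ++ pvPath F f pre.getLast? cur).IsChain (fun a b => b ∈ pvAdjF comp a) ∧
    (∀ x ∈ pre ++ pvPath F f pre.getLast? cur, ∀ y ∈ pvAdjF comp x,
      y ∈ pre ++ pvPath F f pre.getLast? cur) ∧
    (pre ++ pvPath F f pre.getLast? cur).head? = some start ∧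
    ∀ h : (pre ++ pvPath F f pre.getLast? cur) ≠ [],
      (pvAdjF comp ((pre ++ pvPath F f pre.getLast? cur).getLast h)).length ≤ 1 := by
  intro f
  induction f with
  | zero =>
    intro pre cur hnd hmem hch hclo hhead hfuel
    have hstop : ∀ y ∈ pvAdjF comp cur, some y = pre.getLast? := by
      intro y hy
      by_contra hne
      have hfresh := pvNoRevisit comp hdeg2 start hstartdeg pre cur y hnd hmem hch hhead hy hne
      have hsp := hnd.subperm (fun x hx => hmem x hx)
      have hperm := hsp.perm_of_length_le (by
        simp only [List.length_append, List.length_singleton]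
        omega)
      exact hfresh (hperm.mem_iff.2 (pvAdjF_sub_comp hy))
    exact pvPathTerm comp start pre cur hnd hmem hch hclo hhead hstop
  | succ f ih =>
    intro pre cur hnd hmem hch hclo hhead hfuel
    have hcurc : cur ∈ comp := hmem cur (by simp)
    have hFcur : F cur = pvAdjF comp cur := hF cur hcurc
    cases h : (F cur).filter (fun nb => !(some nb == pre.getLast?)) with
    | nil =>
      have hpath : pvPath F (f + 1) pre.getLast? cur = [cur] := by
        simp only [pvPath, h]
      rw [hpath]
      have hstop : ∀ y ∈ pvAdjF comp cur, some y = pre.getLast? := by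
        intro y hy
        rw [hFcur] at h
        have := List.filter_eq_nil_iff.1 h y hy
        simpa using this
      exact pvPathTerm comp start pre cur hnd hmem hch hclo hhead hstop
    | cons nxt t =>
      have hpath : pvPath F (f + 1) pre.getLast? cur = cur :: pvPath F f (some cur) nxt := by
        simp only [pvPath, h]
      rw [hpath]
      rw [hFcur] at h
      have hnxtf : nxt ∈ (pvAdjF comp cur).filter (fun nb => !(some nb == pre.getLast?)) := by
        rw [h]; simp
      have hnxt : nxt ∈ pvAdjF comp cur := (List.mem_filter.1 hnxtf).1
      have hnxtprev : some nxt ≠ pre.getLast? := by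
        have := (List.mem_filter.1 hnxtf).2
        simpa using this
      have hfresh : nxt ∉ pre ++ [cur] :=
        pvNoRevisit comp hdeg2 start hstartdeg pre cur nxt hnd hmem hch hhead hnxt hnxtprev
      have hnd' : ((pre ++ [cur]) ++ [nxt]).Nodup :=
        hnd.append (List.nodup_singleton nxt) (List.disjoint_singleton.2 hfresh)
      have hmem' : ∀ x ∈ (pre ++ [cur]) ++ [nxt], x ∈ comp := by
        intro x hx
        rcases List.mem_append.1 hx with h1 | h1
        · exact hmem x h1
        · simp only [List.mem_singleton] at h1
          subst h1
          exact pvAdjF_sub_comp hnxt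
      have hch' : ((pre ++ [cur]) ++ [nxt]).IsChain (fun a b => b ∈ pvAdjF comp a) := by
        rw [List.isChain_append]
        refine ⟨hch, List.IsChain.singleton nxt, ?_⟩
        intro a ha b hb
        rw [List.getLast?_concat] at ha
        simp only [Option.mem_def, Option.some.injEq, List.head?_cons] at ha hb
        rw [← ha, ← hb]
        exact hnxt
      have hclo' : ∀ x ∈ pre ++ [cur], ∀ y ∈ pvAdjF comp x, y ∈ (pre ++ [cur]) ++ [nxt] := by
        intro x hx y hy
        rcases List.mem_append.1 hx with hxpre | hxcur
        · exact List.mem_append.2 (Or.inl (hclo x hxpre y hy))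
        · simp only [List.mem_singleton] at hxcur
          rw [hxcur] at hy
          by_cases hpre : pre = []
          · subst hpre
            have hcs : cur = start := by simpa using hhead
            have hdeg : (pvAdjF comp cur).length = 1 := by rw [hcs]; exact hstartdeg
            have hynxt := pvLenOne hdeg hnxt y hy
            rw [hynxt]
            simp
          · have hplast : pre.getLast? = some (pre.getLast hpre) :=
              List.getLast?_eq_some_getLast hpre
            obtain ⟨_, _, hedge⟩ := List.isChain_append.1 hch
            have hpadj : cur ∈ pvAdjF comp (pre.getLast hpre) :=
              hedge (pre.getLast hpre) (by rw [hplast]; rfl) cur (by rfl)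
            have hpmem : pre.getLast hpre ∈ comp :=
              hmem _ (List.mem_append.2 (Or.inl (List.getLast_mem hpre)))
            have hpadjcur : pre.getLast hpre ∈ pvAdjF comp cur := pvAdjF_symm hpmem hpadj
            have hpne : pre.getLast hpre ≠ nxt := by
              intro he
              exact hnxtprev (by rw [hplast, he])
            have := pvMemTwo (pvAdjF_nodup comp cur) (hdeg2 cur hcurc) hpadjcur hnxt hpne y hy
            rcases this with hyeq | hyeq
            · rw [hyeq]
              exact List.mem_append.2 (Or.inl (List.mem_append.2 (Or.inl (List.getLast_mem hpre))))
            · rw [hyeq]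
              simp
      have hhead' : ((pre ++ [cur]) ++ [nxt]).head? = some start := by
        rw [List.head?_append, hhead]
        rfl
      have hfuel' : comp.length ≤ f + (pre ++ [cur]).length + 1 := by
        simp only [List.length_append, List.length_singleton]
        omega
      have hIH := ih (pre ++ [cur]) nxt hnd' hmem' hch' hclo' hhead' hfuel'
      rw [List.getLast?_concat] at hIH
      have hassoc : pre ++ (cur :: pvPath F f (some cur) nxt)
          = (pre ++ [cur]) ++ pvPath F f (some cur) nxt := by simp
      rw [hassoc]
      exact hIH


theorem pvCoverage (comp : List (Int × Int)) (hOrd : pvOrdConn comp)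
    (P : List (Int × Int))
    (hclosed : ∀ x ∈ P, ∀ y ∈ pvAdjF comp x, y ∈ P)
    (start : Int × Int) (hstartc : start ∈ comp) (hstartP : start ∈ P) :
    ∀ x ∈ comp, x ∈ P := by
  have hreach_mem : ∀ a b : Int × Int,
      Relation.ReflTransGen (fun a b => b ∈ pvAdjF comp a) a b → a ∈ comp → b ∈ comp := by
    intro a b h ha
    induction h with
    | refl => exact ha
    | tail h1 h2 ih => exact pvAdjF_sub_comp h2
  have hreach_rev : ∀ a b : Int × Int,
      Relation.ReflTransGen (fun a b => b ∈ pvAdjF comp a) a b → a ∈ comp →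
      Relation.ReflTransGen (fun a b => b ∈ pvAdjF comp a) b a := by
    intro a b h ha
    induction h with
    | refl => exact Relation.ReflTransGen.refl
    | tail h1 h2 ih =>
      exact Relation.ReflTransGen.trans
        (Relation.ReflTransGen.single (pvAdjF_symm (hreach_mem _ _ h1 ha) h2)) ih
  have hne : comp ≠ [] := List.ne_nil_of_mem hstartc
  have hlpos : 0 < comp.length := List.length_pos_of_ne_nil hne
  have hreach0 : ∀ i (hi : i < comp.length),
      Relation.ReflTransGen (fun a b => b ∈ pvAdjF comp a)
        (comp[0]'hlpos) (comp[i]'hi) := by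
    intro i
    induction i using Nat.strong_induction_on with
    | _ i ih =>
      intro hi
      by_cases h0 : i = 0
      · subst h0; exact Relation.ReflTransGen.refl
      · obtain ⟨j, hj, hji, hmem⟩ := hOrd i hi h0
        refine Relation.ReflTransGen.tail (ih j hji (by omega)) ?_
        exact mem_pvAdjF.2 ⟨hmem, List.getElem_mem hi⟩
  have hclosedreach : ∀ x, Relation.ReflTransGen (fun a b => b ∈ pvAdjF comp a) start x → x ∈ P := by
    intro x h
    induction h with
    | refl => exact hstartP
    | tail h1 h2 ih => exact hclosed _ ih _ h2
  intro x hx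
  obtain ⟨i, hi, rfl⟩ := List.mem_iff_getElem.1 hx
  obtain ⟨j, hj, hjeq⟩ := List.mem_iff_getElem.1 hstartc
  have h1 := hreach0 i hi
  have h2 := hreach0 j hj
  rw [hjeq] at h2
  have h0mem : comp[0]'hlpos ∈ comp := List.getElem_mem _
  exact hclosedreach _ (Relation.ReflTransGen.trans (hreach_rev _ _ h2 h0mem) h1)

theorem pvDirsOf_length : ∀ P : List (Int × Int), (pvDirsOf P).length = P.length - 1
  | [] => rfl
  | [_] => rfl
  | a :: b :: t => by
    show (pvDirChar (b.1 - a.1) (b.2 - a.2) :: pvDirsOf (b :: t)).length = (a :: b :: t).length - 1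
    rw [List.length_cons, pvDirsOf_length (b :: t)]
    simp

theorem pvDirsOf_getElem : ∀ (P : List (Int × Int)) (i : Nat) (h : i + 1 < P.length),
    (pvDirsOf P)[i]'(by rw [pvDirsOf_length]; omega) =
      pvDirChar ((P[i + 1]'h).1 - (P[i]'(by omega)).1) ((P[i + 1]'h).2 - (P[i]'(by omega)).2)
  | a :: b :: t, 0, _ => rfl
  | a :: b :: t, i + 1, h => by
    show (pvDirChar (b.1 - a.1) (b.2 - a.2) :: pvDirsOf (b :: t))[i + 1]'(by
      simp only [List.length_cons]; rw [pvDirsOf_length]; simp at h ⊢; omega) = _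
    rw [List.getElem_cons_succ]
    exact pvDirsOf_getElem (b :: t) i (by simpa using h)

def pvPredB (comp : List (Int × Int)) (p : Int × Int) : Bool :=
  (pvAdjF comp p).length == 2 &&
    !((((pvAdjF comp p).getD 0 (0, 0)).1 + ((pvAdjF comp p).getD 1 (0, 0)).1 == 2 * p.1) &&
      (((pvAdjF comp p).getD 0 (0, 0)).2 + ((pvAdjF comp p).getD 1 (0, 0)).2 == 2 * p.2))

theorem pvCounting (comp : List (Int × Int)) (hndc : comp.Nodup)
    (hdeg2 : ∀ p ∈ comp, (pvAdjF comp p).length ≤ 2)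
    (P : List (Int × Int)) (hPnd : P.Nodup) (hPmem : ∀ x ∈ P, x ∈ comp)
    (hcover : ∀ x ∈ comp, x ∈ P)
    (hch : P.IsChain (fun a b => b ∈ pvAdjF comp a))
    (hP2 : 2 ≤ P.length)
    (hheaddeg : (pvAdjF comp (P.getD 0 (0, 0))).length = 1)
    (hlastdeg : (pvAdjF comp (P.getD (P.length - 1) (0, 0))).length ≤ 1) :
    ((PySem.List.pyRange 1 (PySem.List.len (pvDirsOf P)) 1).countP
      (fun i => !(PySem.List.pyGetD (pvDirsOf P) i ' ' == PySem.List.pyGetD (pvDirsOf P) (i - 1) ' ')))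
    = comp.countP (pvPredB comp) := by
  obtain ⟨m, hm⟩ : ∃ m, P.length = m + 2 := ⟨P.length - 2, by omega⟩
  have hchain := List.isChain_iff_getElem.1 hch
  have hlhs : ((PySem.List.pyRange 1 (PySem.List.len (pvDirsOf P)) 1).countP
      (fun i => !(PySem.List.pyGetD (pvDirsOf P) i ' ' == PySem.List.pyGetD (pvDirsOf P) (i - 1) ' ')))
      = (List.range m).countP (fun k =>
          !(((P.getD k (0, 0)).1 + (P.getD (k + 2) (0, 0)).1 == 2 * (P.getD (k + 1) (0, 0)).1) &&
            ((P.getD k (0, 0)).2 + (P.getD (k + 2) (0, 0)).2 == 2 * (P.getD (k + 1) (0, 0)).2))) := by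
    have hdslen : PySem.List.len (pvDirsOf P) = ((m + 1 : Nat) : Int) := by
      rw [PySem.List.len_eq, pvDirsOf_length, hm]
      omega
    rw [hdslen, PySem.List.pyRange_one]
    have htn : (((m + 1 : Nat) : Int) - 1).toNat = m := by omega
    rw [htn, List.countP_map]
    apply List.countP_congr
    intro k hk
    rw [List.mem_range] at hk
    simp only [Function.comp_def]
    rw [show (1 : Int) + (k : Int) = ((k + 1 : Nat) : Int) from by push_cast; ring]
    rw [show ((k + 1 : Nat) : Int) - 1 = ((k : Nat) : Int) from by push_cast; ring]
    rw [PySem.List.pyGetD_natCast, PySem.List.pyGetD_natCast]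
    have hk1 : k + 1 < (pvDirsOf P).length := by rw [pvDirsOf_length]; omega
    have hk0 : k < (pvDirsOf P).length := by rw [pvDirsOf_length]; omega
    rw [List.getD_eq_getElem _ _ hk1, List.getD_eq_getElem _ _ hk0]
    rw [pvDirsOf_getElem P (k + 1) (by omega), pvDirsOf_getElem P k (by omega)]
    have hnorm : ∀ n : Nat, n + 1 + 1 = n + 2 := fun _ => rfl
    simp only [hnorm]
    have hd1 : P[k + 2]'(by omega) ∈ pvAdjF comp (P[k + 1]'(by omega)) := by
      have hc := hchain (k + 1) (by omega)
      exact hc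
    have hd0 : P[k + 1]'(by omega) ∈ pvAdjF comp (P[k]'(by omega)) := hchain k (by omega)
    have hu1 := pvDelta_mem (mem_pvAdjF.1 hd1).1
    have hu0 := pvDelta_mem (mem_pvAdjF.1 hd0).1
    have hinj := pvDirChar_inj hu1 hu0
    rw [List.getD_eq_getElem _ _ (show k < P.length from by omega),
      List.getD_eq_getElem _ _ (show k + 1 < P.length from by omega),
      List.getD_eq_getElem _ _ (show k + 2 < P.length from by omega)]
    rw [← Bool.eq_iff_iff]
    refine congrArg (fun b : Bool => !b) ?_
    rw [Bool.eq_iff_iff, beq_iff_eq, Bool.and_eq_true, beq_iff_eq, beq_iff_eq, hinj,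
      Prod.mk.injEq]
    constructor
    · rintro ⟨h1, h2⟩
      exact ⟨by omega, by omega⟩
    · rintro ⟨h1, h2⟩
      exact ⟨by omega, by omega⟩
  have hrhs : comp.countP (pvPredB comp) = (List.range m).countP (fun k =>
      !(((P.getD k (0, 0)).1 + (P.getD (k + 2) (0, 0)).1 == 2 * (P.getD (k + 1) (0, 0)).1) &&
        ((P.getD k (0, 0)).2 + (P.getD (k + 2) (0, 0)).2 == 2 * (P.getD (k + 1) (0, 0)).2))) := by
    have hperm : comp.Perm P :=
      (List.perm_ext_iff_of_nodup hndc hPnd).2 (fun a => ⟨fun h => hcover a h, fun h => hPmem a h⟩)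
    rw [hperm.countP_eq, pvCountPIndex P (0, 0) (pvPredB comp), hm, List.range_succ,
      List.countP_append]
    have hlast0 : List.countP (fun i => pvPredB comp (P.getD i (0, 0))) [m + 1] = 0 := by
      have hpl : pvPredB comp (P.getD (m + 1) (0, 0)) = false := by
        unfold pvPredB
        rw [show P.length - 1 = m + 1 from by omega] at hlastdeg
        have hne2 : ((pvAdjF comp (P.getD (m + 1) (0, 0))).length == 2) = false := by
          rw [beq_eq_false_iff_ne]
          omega
        rw [hne2, Bool.false_and]
      rw [List.getD_eq_getElem?_getD] at hpl
      simp [hpl]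
    rw [hlast0, Nat.add_zero, List.range_succ_eq_map, List.countP_cons]
    have hhead0 : pvPredB comp (P.getD 0 (0, 0)) = false := by
      unfold pvPredB
      rw [hheaddeg]
      rfl
    rw [hhead0]
    simp only [if_false, Bool.false_eq_true, Nat.add_zero, List.countP_map]
    apply List.countP_congr
    intro k hk
    rw [List.mem_range] at hk
    simp only [Function.comp_def]
    have hgd0 : P.getD (k : Nat) (0, 0) = P[k]'(by omega) := List.getD_eq_getElem _ _ (by omega)
    have hgd1 : P.getD (k + 1) (0, 0) = P[k + 1]'(by omega) := List.getD_eq_getElem _ _ (by omega)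
    have hgd2 : P.getD (k + 2) (0, 0) = P[k + 2]'(by omega) := List.getD_eq_getElem _ _ (by omega)
    have hd0 : P[k + 1]'(by omega) ∈ pvAdjF comp (P[k]'(by omega)) := hchain k (by omega)
    have hd1 : P[k + 2]'(by omega) ∈ pvAdjF comp (P[k + 1]'(by omega)) := by
      have hc := hchain (k + 1) (by omega)
      exact hc
    have hamem : P[k]'(by omega) ∈ comp := hPmem _ (List.getElem_mem _)
    have haadj : P[k]'(by omega) ∈ pvAdjF comp (P[k + 1]'(by omega)) := pvAdjF_symm hamem hd0
    have hac : P[k]'(by omega) ≠ P[k + 2]'(by omega) := by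
      have hne2 : ¬(P[k]'(by omega) = P[k + 2]'(by omega)) := by
        rw [hPnd.getElem_inj_iff]
        omega
      exact hne2
    have hlen2 : (pvAdjF comp (P[k + 1]'(by omega))).length = 2 :=
      le_antisymm (hdeg2 _ (hPmem _ (List.getElem_mem _))) (pvTwoMemLen hac haadj hd1)
    unfold pvPredB
    rw [hgd1] at *
    rw [hgd0, hgd2, hlen2]
    rcases pvPairList (pvAdjF_nodup comp (P[k + 1]'(by omega))) hlen2 haadj hd1 hac with hpl | hpl
    · rw [hpl]
      simp only [List.getD_cons_zero, List.getD_cons_succ]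
      rfl
    · rw [hpl]
      simp only [List.getD_cons_zero, List.getD_cons_succ]
      rw [Int.add_comm ((P[k + 2]'(by omega)).1) ((P[k]'(by omega)).1),
        Int.add_comm ((P[k + 2]'(by omega)).2) ((P[k]'(by omega)).2)]
      rfl
  rw [hlhs, hrhs]


theorem pvColorEq (g : List (List Int)) (rows cols : Int) (comp : List (Int × Int))
    (hgood : pvGoodComp g rows cols comp) (hlen2 : 2 ≤ comp.length) :
    pvColorA g rows cols comp = pvColorB comp := by
  obtain ⟨hnd, hvals, hord⟩ := hgood
  have hadj : ∀ p ∈ comp, (pvAdjDict g rows cols comp).getD p [] = pvAdjF comp p :=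
    fun p hp => pvAdjDict_getD g rows cols comp hnd hvals p hp
  unfold pvColorA pvColorB
  simp only []
  rw [pvDegrees_values (pvAdjDict g rows cols comp) comp hnd]
  have hmapA : comp.map (fun c => PySem.List.len ((pvAdjDict g rows cols comp).getD c []))
      = comp.map (fun p => (((pvAdjF comp p).length : Nat) : Int)) :=
    List.map_congr_left (fun a ha => by rw [hadj a ha, PySem.List.len_eq])
  have hmapB : comp.map (fun p => PySem.List.len (pvNeighB (PySem.Set.ofList comp) p))
      = comp.map (fun p => (((pvAdjF comp p).length : Nat) : Int)) :=
    List.map_congr_left (fun a _ => by rw [pvNeighB_eq, PySem.List.len_eq])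
  rw [hmapA, hmapB, List.count_eq_countP]
  by_cases hcond : (!((((List.countP (fun x => x == (1 : Int))
        (comp.map (fun p => (((pvAdjF comp p).length : Nat) : Int)))) : Nat) : Int) == 2)
      || (comp.map (fun p => (((pvAdjF comp p).length : Nat) : Int))).any
          (fun dg => decide (2 < dg))) = true
  · rw [if_pos hcond, if_pos hcond]
  · rw [if_neg hcond, if_neg hcond]
    rw [Bool.or_eq_true, not_or] at hcond
    obtain ⟨hends, hbranch⟩ := hcond
    rw [Bool.not_eq_true, Bool.not_eq_false', beq_iff_eq] at hends
    rw [Bool.not_eq_true] at hbranch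
    have hdeg2 : ∀ p ∈ comp, (pvAdjF comp p).length ≤ 2 := by
      intro p hp
      have := List.any_eq_false.1 hbranch _ (List.mem_map.2 ⟨p, hp, rfl⟩)
      simp at this
      omega
    have hcount : comp.countP (fun p => ((((pvAdjF comp p).length : Nat) : Int) == 1)) = 2 := by
      rw [List.countP_map] at hends
      simp only [Function.comp_def] at hends
      omega
    have hex : ∃ x ∈ comp, ((((pvAdjF comp x).length : Nat) : Int) == 1) = true := by
      by_contra hno
      simp only [not_exists, not_and] at hno
      have h0 : comp.countP (fun p => ((((pvAdjF comp p).length : Nat) : Int) == 1)) = 0 :=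
        List.countP_eq_zero.2 (by intro a ha; exact by simpa using hno a ha)
      omega
    have hfc : comp.find? (fun cell =>
        (comp.foldl (fun d cell => d.insert cell (PySem.List.len
          ((pvAdjDict g rows cols comp).getD cell []))) PySem.Dict.empty).getD cell 0 == 1)
        = comp.find? (fun cell => ((((pvAdjF comp cell).length : Nat) : Int) == 1)) := by
      apply pvFindCongr
      intro x hx
      rw [pvDegrees_getD (pvAdjDict g rows cols comp) comp hnd x hx, hadj x hx,
        PySem.List.len_eq]
    rw [hfc]
    have hsome : (comp.find? (fun cell => ((((pvAdjF comp cell).length : Nat) : Int) == 1))).isSome :=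
      List.find?_isSome.2 hex
    obtain ⟨start, hfind⟩ := Option.isSome_iff_exists.1 hsome
    rw [hfind]
    dsimp only
    have hstartmem : start ∈ comp := List.mem_of_find?_eq_some hfind
    have hstartdeg : (pvAdjF comp start).length = 1 := by
      have := List.find?_some hfind
      rw [beq_iff_eq] at this
      omega
    -- the walk's path
    rw [pvWalk_eq_dirsOf, List.nil_append]
    have hspec := pvPathSpec comp (fun c => (pvAdjDict g rows cols comp).getD c []) hadj hdeg2
      start hstartdeg comp.length [] start (by simp) (by intro x hx; simp at hx; rw [hx]; exact hstartmem)
      (by simp) (by intro x hx; simp at hx) rfl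
      (by simp)
    simp only [List.nil_append, List.getLast?_nil] at hspec
    obtain ⟨hPnd, hPmem, hPch, hPclo, hPhead, hPlast⟩ := hspec
    obtain ⟨rest, hrest⟩ := pvPath_cons (fun c => (pvAdjDict g rows cols comp).getD c [])
      comp.length none start
    have hPne : pvPath (fun c => (pvAdjDict g rows cols comp).getD c []) comp.length none start ≠ [] := by
      rw [hrest]; simp
    have hcover := pvCoverage comp hord _ hPclo start hstartmem (by rw [hrest]; simp)
    have hP2 : 2 ≤ (pvPath (fun c => (pvAdjDict g rows cols comp).getD c []) comp.length none start).length := by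
      have hsp := hnd.subperm (fun x hx => hcover x hx)
      have := hsp.length_le
      omega
    have hheadD : (pvPath (fun c => (pvAdjDict g rows cols comp).getD c []) comp.length none start).getD 0 (0, 0) = start := by
      rw [hrest]
      rfl
    have hlastD : (pvPath (fun c => (pvAdjDict g rows cols comp).getD c []) comp.length none start).getD
        ((pvPath (fun c => (pvAdjDict g rows cols comp).getD c []) comp.length none start).length - 1) (0, 0)
        = (pvPath (fun c => (pvAdjDict g rows cols comp).getD c []) comp.length none start).getLast hPne := by
      rw [List.getLast_eq_getElem, List.getD_eq_getElem]
    have hbc := pvCounting comp hnd hdeg2 _ hPnd hPmem hcover hPch hP2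
      (by rw [hheadD]; exact hstartdeg) (by rw [hlastD]; exact hPlast hPne)
    simp only [pvNeighB_eq]
    rw [hbc]
    rfl

theorem pvProcessEq (g : List (List Int)) (rows cols : Int) (out : List (List Int))
    (comp : List (Int × Int)) (hgood : pvGoodComp g rows cols comp) :
    pvProcessA g rows cols out comp = pvProcessB out comp := by
  unfold pvProcessA pvProcessB
  by_cases h0 : comp.length = 0
  · rw [if_pos h0]
    have hnil : comp = [] := List.length_eq_zero_iff.1 h0
    subst hnil
    simp [pvPaint]
  · rw [if_neg h0]
    by_cases h1 : comp.length = 1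
    · rw [if_pos h1, if_pos h1]
      obtain ⟨x, rfl⟩ := List.length_eq_one_iff.1 h1
      simp [pvPaint]
    · rw [if_neg h1, if_neg h1]
      rw [pvColorEq g rows cols comp hgood (by omega)]

-- ===== VERDICT (by name: the statement is the Claim_ definition above) =====
theorem transform_spec : Claim_equal_transform := by
  unfold Claim_equal_transform Spec_transform
  intro grid_lst _hdom _hpre
  unfold transform transform_alt
  cases grid_lst with
  | nil => rfl
  | cons g0 rest =>
    dsimp only
    by_cases hg : g0.length = 0
    · rw [if_pos hg, if_pos hg]
    · rw [if_neg hg, if_neg hg]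
      apply PySem.List.foldl_congr_mem
      intro acc comp hcomp
      exact pvProcessEq _ _ _ acc comp
        (pvComponents_good _ _ _ comp hcomp)
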